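-- pv_equiv track=rewrite | github.com/halfway-lab/HWP | runs/report_benchmark_overview.py | summarize_overall
-- ===== SOURCE A (Python) =====
-- def summarize_overall(rows: list[dict[str, str]], per_benchmark: list[dict[str, str]]) -> list[str]:
--     total = len(rows)
--     run_pass = sum(1 for row in per_benchmark if row.get("run_status") == "pass")
--     full_pass = sum(
--         1 for row in per_benchmark if row.get("run_status") == "pass" and row.get("verifier_status") == "pass"
--     )
--     chains_found = sum(int(row.get("timing_chains", "0") or 0) for row in per_benchmark)
--     rounds_completed = sum(int(row.get("timing_rounds", "0") or 0) for row in per_benchmark)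
--
--     return [
--         f"- Benchmarks run: {total}",
--         f"- Run success: {run_pass}/{total}" if total else "- Run success: 0/0",
--         f"- Full protocol pass: {full_pass}/{total}" if total else "- Full protocol pass: 0/0",
--         f"- Chains with timing found: {chains_found}",
--         f"- Total completed rounds observed: {rounds_completed}",
--         f"- Total wall duration (sec): {sum(int(row.get('duration_sec', '0') or 0) for row in rows)}",
--     ]
-- ===== SOURCE B (Python) =====
-- def _total(items: list[dict[str, str]], key: str) -> int:
--     t = 0
--     for row in items:
--         t += int(row.get(key, "0") or 0)
--     return t
--
--
-- def summarize_overall(rows: list[dict[str, str]], per_benchmark: list[dict[str, str]]) -> list[str]: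
--     # Histogram of (run_status, verifier_status) pairs; both counts fall out of it.
--     hist: dict[tuple, int] = {}
--     for row in per_benchmark:
--         key = (row.get("run_status"), row.get("verifier_status"))
--         hist[key] = hist.get(key, 0) + 1
--     run_pass = sum(c for (rs, _vs), c in hist.items() if rs == "pass")
--     full_pass = hist.get(("pass", "pass"), 0)
--     chains_found = _total(per_benchmark, "timing_chains")
--     rounds_completed = _total(per_benchmark, "timing_rounds")
--     wall = _total(rows, "duration_sec")
--     total = len(rows)
--     return [
--         f"- Benchmarks run: {total}",
--         f"- Run success: {run_pass}/{total}" if total else "- Run success: 0/0",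
--         f"- Full protocol pass: {full_pass}/{total}" if total else "- Full protocol pass: 0/0",
--         f"- Chains with timing found: {chains_found}",
--         f"- Total completed rounds observed: {rounds_completed}",
--         f"- Total wall duration (sec): {wall}",
--     ]
-- ===== Notes on version B (the rewrite author's own statement) =====
-- stated objective: alternative
-- what changed: Instead of A's two boolean-counting comprehensions over per_benchmark, B builds one histogram dict keyed by the (run_status, verifier_status) pair and derives run_pass by summing the matching histogram entries and full_pass by a single ('pass','pass') lookup; the three int-sums go through one shared explicit-accumulator helper instead of inline generator expressions.
import Mathlib
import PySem

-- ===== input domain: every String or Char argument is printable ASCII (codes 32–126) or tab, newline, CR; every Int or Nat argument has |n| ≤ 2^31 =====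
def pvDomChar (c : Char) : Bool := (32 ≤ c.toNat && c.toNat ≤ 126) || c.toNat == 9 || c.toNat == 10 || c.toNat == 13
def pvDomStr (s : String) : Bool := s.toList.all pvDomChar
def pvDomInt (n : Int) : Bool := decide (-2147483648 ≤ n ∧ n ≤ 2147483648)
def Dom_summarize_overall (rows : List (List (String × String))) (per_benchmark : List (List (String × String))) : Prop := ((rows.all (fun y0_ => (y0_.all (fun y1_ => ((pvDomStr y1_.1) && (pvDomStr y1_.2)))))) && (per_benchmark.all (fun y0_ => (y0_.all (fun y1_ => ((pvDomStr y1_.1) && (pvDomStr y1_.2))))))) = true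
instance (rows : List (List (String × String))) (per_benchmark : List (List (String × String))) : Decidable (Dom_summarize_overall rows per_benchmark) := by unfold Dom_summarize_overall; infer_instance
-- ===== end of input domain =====

-- B replaces A's two boolean-counting comprehensions by one histogram (dict of
-- (run_status, verifier_status) pairs built in one pass) whose entries yield both counts,
-- and routes the three int-sums through one shared helper loop; same output everywhere A returns.


-- ===== PORT A =====
-- int(v or 0): empty string is falsy → 0; otherwise int(v).  Pre_ excludes the inputs
-- where int(v) raises ValueError (ofStr? = none), so the .getD 0 default is never claimed about.
def pyIntOr0 (v : String) : Int := if v == "" then 0 else (PySem.Int.ofStr? v).getD 0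

def summarize_overall (rows : List (List (String × String))) (per_benchmark : List (List (String × String))) : List String :=
  let total : Int := (rows.length : Int)
  let run_pass : Int :=
    ((per_benchmark.filter (fun row => PySem.Dict.get? (PySem.Dict.mk row) "run_status" == some "pass")).map
      (fun _ => (1 : Int))).sum
  let full_pass : Int :=
    ((per_benchmark.filter (fun row =>
        PySem.Dict.get? (PySem.Dict.mk row) "run_status" == some "pass" &&
        PySem.Dict.get? (PySem.Dict.mk row) "verifier_status" == some "pass")).map
      (fun _ => (1 : Int))).sum
  let chains_found : Int :=
    (per_benchmark.map (fun row => pyIntOr0 (PySem.Dict.getD (PySem.Dict.mk row) "timing_chains" "0"))).sum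
  let rounds_completed : Int :=
    (per_benchmark.map (fun row => pyIntOr0 (PySem.Dict.getD (PySem.Dict.mk row) "timing_rounds" "0"))).sum
  [ "- Benchmarks run: " ++ PySem.Int.toStr total,
    if total ≠ 0 then "- Run success: " ++ PySem.Int.toStr run_pass ++ "/" ++ PySem.Int.toStr total
      else "- Run success: 0/0",
    if total ≠ 0 then "- Full protocol pass: " ++ PySem.Int.toStr full_pass ++ "/" ++ PySem.Int.toStr total
      else "- Full protocol pass: 0/0",
    "- Chains with timing found: " ++ PySem.Int.toStr chains_found,
    "- Total completed rounds observed: " ++ PySem.Int.toStr rounds_completed,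
    "- Total wall duration (sec): " ++
      PySem.Int.toStr ((rows.map (fun row => pyIntOr0 (PySem.Dict.getD (PySem.Dict.mk row) "duration_sec" "0"))).sum) ]

-- ===== PORT B =====
-- helper _total: explicit accumulator loop over the rows summing int(row.get(key,'0') or 0)
def altTotal (items : List (List (String × String))) (key : String) : Int :=
  items.foldl (fun t row => t + pyIntOr0 (PySem.Dict.getD (PySem.Dict.mk row) key "0")) 0

-- the (run_status, verifier_status) key of a row
def altKey (row : List (String × String)) : Option String × Option String :=
  (PySem.Dict.get? (PySem.Dict.mk row) "run_status", PySem.Dict.get? (PySem.Dict.mk row) "verifier_status")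

def summarize_overall_alt (rows : List (List (String × String))) (per_benchmark : List (List (String × String))) : List String :=
  -- hist[key] = hist.get(key, 0) + 1 over per_benchmark
  let hist : PySem.Dict (Option String × Option String) Int :=
    per_benchmark.foldl (fun d row => d.insert (altKey row) (d.getD (altKey row) 0 + 1)) PySem.Dict.empty
  let run_pass : Int := ((hist.items.filter (fun p => p.1.1 == some "pass")).map (·.2)).sum
  let full_pass : Int := hist.getD (some "pass", some "pass") 0
  let chains_found : Int := altTotal per_benchmark "timing_chains"
  let rounds_completed : Int := altTotal per_benchmark "timing_rounds"
  let wall : Int := altTotal rows "duration_sec"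
  let total : Int := (rows.length : Int)
  [ "- Benchmarks run: " ++ PySem.Int.toStr total,
    if total ≠ 0 then "- Run success: " ++ PySem.Int.toStr run_pass ++ "/" ++ PySem.Int.toStr total
      else "- Run success: 0/0",
    if total ≠ 0 then "- Full protocol pass: " ++ PySem.Int.toStr full_pass ++ "/" ++ PySem.Int.toStr total
      else "- Full protocol pass: 0/0",
    "- Chains with timing found: " ++ PySem.Int.toStr chains_found,
    "- Total completed rounds observed: " ++ PySem.Int.toStr rounds_completed,
    "- Total wall duration (sec): " ++ PySem.Int.toStr wall ]

-- ===== PRECONDITION & SPEC =====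
-- Pre_ excludes exactly the inputs where Python A raises ValueError: a non-empty
-- timing_chains / timing_rounds / duration_sec value that int() cannot parse.
def pvIntOk (v : String) : Bool := v == "" || (PySem.Int.ofStr? v).isSome

def Pre_summarize_overall (rows : List (List (String × String))) (per_benchmark : List (List (String × String))) : Prop :=
  ((per_benchmark.all (fun row =>
      pvIntOk (PySem.Dict.getD (PySem.Dict.mk row) "timing_chains" "0") &&
      pvIntOk (PySem.Dict.getD (PySem.Dict.mk row) "timing_rounds" "0"))) &&
   (rows.all (fun row => pvIntOk (PySem.Dict.getD (PySem.Dict.mk row) "duration_sec" "0")))) = true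

instance (rows : List (List (String × String))) (per_benchmark : List (List (String × String))) : Decidable (Pre_summarize_overall rows per_benchmark) := by unfold Pre_summarize_overall; infer_instance

def pvWitness_summarize_overall : (List (List (String × String))) × (List (List (String × String))) :=
  ([[("duration_sec", "3")]],
   [[("run_status", "pass"), ("verifier_status", "pass"), ("timing_chains", "2"), ("timing_rounds", "5")]])

def Spec_summarize_overall (rows : List (List (String × String))) (per_benchmark : List (List (String × String))) (out : List String) : Prop := out = summarize_overall_alt rows per_benchmark
instance (rows : List (List (String × String))) (per_benchmark : List (List (String × String))) (out : List String) : Decidable (Spec_summarize_overall rows per_benchmark out) := by unfold Spec_summarize_overall; infer_instance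

-- ===== CLAIM (what is proved, stated in full; the proofs are below) =====
def Claim_equal_summarize_overall : Prop := ∀ (rows : List (List (String × String))) (per_benchmark : List (List (String × String))), Dom_summarize_overall rows per_benchmark → Pre_summarize_overall rows per_benchmark → Spec_summarize_overall rows per_benchmark (summarize_overall rows per_benchmark)

-- ===== LEMMAS AND PROOFS =====

-- summing the multiplicities of the distinct keys selected by q counts the q-elements of l
lemma sum_count_ofList {α : Type} [inst : BEq α] [LawfulBEq α] (l : List α) (q : α → Bool) :
    (((PySem.Set.ofList l).filter q).map (fun k => (l.count k : Int))).sum = (l.countP q : Int) := by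
  letI d : DecidableEq α := instDecidableEqOfLawfulBEq
  have hinst : instBEqOfDecidableEq (α := α) = inst := lawful_beq_subsingleton _ _
  have hperm : (PySem.Set.ofList l).Perm l.dedup := by
    apply List.perm_of_nodup_nodup_toFinset_eq (PySem.Set.nodup_ofList l) l.nodup_dedup
    ext a
    simp [List.mem_toFinset, PySem.Set.mem_ofList, List.mem_dedup]
  rw [((hperm.filter q).map (fun k => (l.count k : Int))).sum_eq]
  have h2 := List.sum_map_count_dedup_filter_eq_countP q l
  rw [hinst] at h2
  calc ((l.dedup.filter q).map (fun k => (l.count k : Int))).sum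
      = (((l.dedup.filter q).map l.count).sum : Int) := by
        rw [Nat.cast_list_sum, List.map_map]; rfl
    _ = (l.countP q : Int) := by rw [h2]

-- the histogram fold is Counter(per_benchmark keys)
lemma hist_eq_counter (pb : List (List (String × String))) :
    pb.foldl (fun d row => d.insert (altKey row) (d.getD (altKey row) 0 + 1)) PySem.Dict.empty
      = PySem.Dict.counter (pb.map altKey) := by
  rw [← PySem.Dict.foldl_insert_getD_add_one_eq_counter, List.foldl_map]

-- A's 0/1-comprehension sum is a countP
lemma sum_one_filter (pb : List (List (String × String))) (c : List (String × String) → Bool) :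
    ((pb.filter c).map (fun _ => (1 : Int))).sum = (pb.countP c : Int) := by
  rw [List.countP_eq_length_filter]
  induction pb.filter c with
  | nil => simp
  | cons x xs ih => simp; omega

-- ===== VERDICT (by name: the statement is the Claim_ definition above) =====
theorem summarize_overall_spec : Claim_equal_summarize_overall := by
  intro rows pb _ _
  unfold Spec_summarize_overall summarize_overall summarize_overall_alt altTotal
  rw [hist_eq_counter]
  -- run_pass: items of the counter, filtered on fst = "pass", summed = count of run_status-pass rows
  have hrun :
      (((PySem.Dict.counter (pb.map altKey)).items.filter (fun p => p.1.1 == some "pass")).map (·.2)).sum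
        = ((pb.filter (fun row => PySem.Dict.get? (PySem.Dict.mk row) "run_status" == some "pass")).map
            (fun _ => (1 : Int))).sum := by
    rw [PySem.Dict.items_counter, sum_one_filter, List.filter_map, List.map_map]
    simp only [Function.comp_def]
    rw [sum_count_ofList (pb.map altKey) (fun k => k.1 == some "pass"), List.countP_map]
    congr 1
  -- full_pass: counter lookup at ("pass","pass") = count of fully passing rows
  have hfull :
      (PySem.Dict.counter (pb.map altKey)).getD (some "pass", some "pass") 0
        = ((pb.filter (fun row =>
            PySem.Dict.get? (PySem.Dict.mk row) "run_status" == some "pass" &&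
            PySem.Dict.get? (PySem.Dict.mk row) "verifier_status" == some "pass")).map
            (fun _ => (1 : Int))).sum := by
    rw [PySem.Dict.getD_counter, sum_one_filter, List.count_eq_countP, List.countP_map]
    congr 1
  -- the three totals: accumulator loop = map-sum
  have htot : ∀ (xs : List (List (String × String))) (key : String),
      xs.foldl (fun t row => t + pyIntOr0 (PySem.Dict.getD (PySem.Dict.mk row) key "0")) 0
        = (xs.map (fun row => pyIntOr0 (PySem.Dict.getD (PySem.Dict.mk row) key "0"))).sum := by
    intro xs key
    rw [PySem.List.foldl_add]
    simp
  simp only [hrun, hfull, htot]
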